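-- pv_equiv track=rewrite | github.com/TaeHyoungKwon/Codewars | c_2021/python/code_wars_7kyu/a_210825_seven_ate_9.py | seven_ate9
-- ===== SOURCE A (Python) =====
-- def seven_ate9(str_):
--     result = []
--     for index, ele in enumerate(str_):
--         if index != len(str_) - 1 and index != 0:
--             if ele == "9" and str_[index - 1] == "7" and str_[index + 1] == "7":
--                 continue
--         result.append(ele)
--     return "".join(result)
-- ===== SOURCE B (Python) =====
-- def seven_ate9(str_):
--     n = len(str_)
--     out = []
--     i = 0
--     while i < n:
--         if i + 2 < n and str_[i] == "7" and str_[i + 1] == "9" and str_[i + 2] == "7":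
--             out.append("7")
--             i += 2
--         else:
--             out.append(str_[i])
--             i += 1
--     return "".join(out)
-- ===== Notes on version B (the rewrite author's own statement) =====
-- stated objective: alternative
-- what changed: A enumerates every index and tests each character's two original-string neighbours with first/last-index guards; B is a greedy forward scanner that, when the three-character seven-nine-seven window starts at the cursor, emits the leading seven and jumps two positions ahead (re-anchoring on the trailing seven), never inspecting neighbours or index boundaries.
import Mathlib
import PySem

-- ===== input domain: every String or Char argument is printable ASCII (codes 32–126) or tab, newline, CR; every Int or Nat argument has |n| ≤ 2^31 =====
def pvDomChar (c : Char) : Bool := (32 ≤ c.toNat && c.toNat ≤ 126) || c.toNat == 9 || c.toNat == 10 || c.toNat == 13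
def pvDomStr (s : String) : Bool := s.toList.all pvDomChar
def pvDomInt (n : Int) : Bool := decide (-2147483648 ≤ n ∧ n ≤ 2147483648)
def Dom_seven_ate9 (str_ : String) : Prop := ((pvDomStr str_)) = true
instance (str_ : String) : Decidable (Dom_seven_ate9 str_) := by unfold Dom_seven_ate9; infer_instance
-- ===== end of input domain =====

-- B replaces A's per-index neighbour test by a greedy "797"-consuming forward scan (objective: alternative, same cost).

-- ===== PORT A =====
-- for index, ele in enumerate(str_): skip ele when the index guards hold and it is a 7-flanked '9'.
def seven_ate9 (str_ : String) : String :=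
  let cs := str_.toList
  String.mk ((PySem.List.enumerate cs 0).foldl (fun acc p =>
    if p.1 ≠ (cs.length : Int) - 1 ∧ p.1 ≠ 0 then
      if p.2 = '9' ∧ PySem.List.pyGetD cs (p.1 - 1) ' ' = '7' ∧ PySem.List.pyGetD cs (p.1 + 1) ' ' = '7'
      then acc
      else acc ++ [p.2]
    else acc ++ [p.2]) [])

-- ===== PORT B =====
-- while i < n: if str_[i..i+2] is "797", append '7' and jump 2; else append str_[i] and advance 1.
def sevenAlt_loop (cs : List Char) (n : Nat) (i : Nat) (out : List Char) : List Char :=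
  if h : i < n then
    if i + 2 < n ∧ cs.getD i ' ' = '7' ∧ cs.getD (i + 1) ' ' = '9' ∧ cs.getD (i + 2) ' ' = '7' then
      sevenAlt_loop cs n (i + 2) (out ++ ['7'])
    else
      sevenAlt_loop cs n (i + 1) (out ++ [cs.getD i ' '])
  else out
termination_by n - i
decreasing_by all_goals omega

def seven_ate9_alt (str_ : String) : String :=
  let cs := str_.toList
  String.mk (sevenAlt_loop cs cs.length 0 [])

-- ===== PRECONDITION & SPEC =====
def Spec_seven_ate9 (str_ : String) (out : String) : Prop := out = seven_ate9_alt str_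
instance (str_ : String) (out : String) : Decidable (Spec_seven_ate9 str_ out) := by unfold Spec_seven_ate9; infer_instance

-- ===== CLAIM (what is proved, stated in full; the proofs are below) =====
def Claim_equal_seven_ate9 : Prop := ∀ (str_ : String), Dom_seven_ate9 str_ → Spec_seven_ate9 str_ (seven_ate9 str_)

-- ===== LEMMAS AND PROOFS =====

-- common normal form: keep `c` unless the previous char is '7', c is '9', and the next char is '7'
def pvMid (prev : Char) : List Char → List Char
  | [] => []
  | c :: t => if prev = '7' ∧ c = '9' ∧ t.head? = some '7' then pvMid c t else c :: pvMid c t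

def pvGM : List Char → List Char
  | [] => []
  | c :: t => c :: pvMid c t

theorem pv_drop_head (cs : List Char) (i : Nat) (c : Char) (t : List Char)
    (h : cs.drop i = c :: t) : cs[i]? = some c := by
  have h0 : (cs.drop i)[0]? = cs[i + 0]? := List.getElem?_drop
  rw [h] at h0; simpa using h0.symm

theorem pv_drop_tail (cs : List Char) (i : Nat) (c : Char) (t : List Char)
    (h : cs.drop i = c :: t) : cs.drop (i + 1) = t := by
  have h1 : cs.drop (i + 1) = (cs.drop i).drop 1 := by rw [List.drop_drop]
  rw [h1, h]; simp

theorem pv_drop_len (cs : List Char) (i : Nat) (c : Char) (t : List Char)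
    (h : cs.drop i = c :: t) : cs.length = i + t.length + 1 := by
  have hle : i ≤ cs.length := by
    by_contra hi
    rw [List.drop_eq_nil_of_le (by omega)] at h
    simp at h
  have := congrArg List.length h
  simp [List.length_drop] at this
  omega

-- B's loop appends pvGM of the remaining suffix
theorem sevenAlt_loop_eq (cs : List Char) (m : Nat) :
    ∀ (t : List Char), t.length ≤ m → ∀ (i : Nat) (out : List Char), cs.drop i = t →
      sevenAlt_loop cs cs.length i out = out ++ pvGM t := by
  induction m with
  | zero =>
    intro t ht i out hdrop
    have ht0 : t = [] := by cases t <;> simp_all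
    subst ht0
    rw [sevenAlt_loop]
    have hni : ¬ i < cs.length := by
      intro h
      have := congrArg List.length hdrop
      simp [List.length_drop] at this; omega
    simp [hni, pvGM]
  | succ m ih =>
    intro t ht i out hdrop
    cases t with
    | nil =>
      rw [sevenAlt_loop]
      have hni : ¬ i < cs.length := by
        intro h
        have := congrArg List.length hdrop
        simp [List.length_drop] at this; omega
      simp [hni, pvGM]
    | cons c t' =>
      have hlen : cs.length = i + t'.length + 1 := pv_drop_len cs i c t' hdrop
      have hci : cs[i]? = some c := pv_drop_head cs i c t' hdrop
      have hgi : cs.getD i ' ' = c := by simp [List.getD_eq_getElem?_getD, hci]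
      have hdrop1 : cs.drop (i + 1) = t' := pv_drop_tail cs i c t' hdrop
      rw [sevenAlt_loop]
      simp only [show i < cs.length by omega, dite_true, hgi]
      cases t' with
      | nil =>
        have hlen1 : cs.length = i + 1 := by simpa using hlen
        have hcond : ¬ (i + 2 < cs.length ∧ c = '7' ∧ cs.getD (i+1) ' ' = '9' ∧ cs.getD (i+2) ' ' = '7') := by
          intro hc; exact absurd hc.1 (by omega)
        rw [if_neg hcond, ih [] (by simp) (i+1) _ hdrop1]
        simp [pvGM, pvMid]
      | cons b u =>
        have hlen2 : cs.length = i + u.length + 2 := by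
          have := pv_drop_len cs (i+1) b u hdrop1; omega
        have hbi : cs[i+1]? = some b := pv_drop_head cs (i+1) b u hdrop1
        have hgb : cs.getD (i+1) ' ' = b := by simp [List.getD_eq_getElem?_getD, hbi]
        have hdrop2 : cs.drop (i + 2) = u := pv_drop_tail cs (i+1) b u hdrop1
        have hm : u.length + 1 ≤ m := by
          simp only [List.length_cons] at ht; omega
        by_cases hpat : i + 2 < cs.length ∧ c = '7' ∧ cs.getD (i+1) ' ' = '9' ∧ cs.getD (i+2) ' ' = '7'
        · -- pattern "797": u is nonempty with head '7'
          obtain ⟨h2, hc7, hb9, hu7⟩ := hpat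
          have hb9' : b = '9' := by rw [hgb] at hb9; exact hb9
          obtain ⟨d, v, huv⟩ : ∃ d v, u = d :: v := by
            cases hu : u with
            | nil => exfalso; rw [hu] at hlen2; simp at hlen2; omega
            | cons d v => exact ⟨d, v, rfl⟩
          have hdv : cs[i+2]? = some d := pv_drop_head cs (i+2) d v (huv ▸ hdrop2)
          have hd7 : d = '7' := by
            rw [List.getD_eq_getElem?_getD, hdv] at hu7; simpa using hu7
          rw [if_pos ⟨h2, hc7, hb9, hu7⟩, ih u (by omega) (i+2) _ hdrop2]
          subst hc7; subst hb9'; subst huv; subst hd7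
          simp [pvGM, pvMid]
        · -- no pattern at i: the head of the suffix is kept
          rw [if_neg hpat, ih (b :: u) (by simpa using hm) (i+1) _ hdrop1]
          have hmid : pvMid c (b :: u) = b :: pvMid b u := by
            rcases hu : u with _ | ⟨d, v⟩
            · simp [pvMid]
            · by_cases hk : c = '7' ∧ b = '9' ∧ d = '7'
              · exfalso
                apply hpat
                have hdv : cs[i+2]? = some d := pv_drop_head cs (i+2) d v (hu ▸ hdrop2)
                refine ⟨by rw [hu] at hlen2; simp at hlen2; omega, hk.1, by rw [hgb]; exact hk.2.1, ?_⟩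
                simp [List.getD_eq_getElem?_getD, hdv, hk.2.2]
              · simp only [pvMid, List.head?_cons]
                rw [if_neg (by simpa using hk)]
          simp [pvGM, hmid]

-- A's loop appends pvMid of the remaining suffix (k ≥ 1, prev = cs[k-1])
theorem sevenA_loop_eq (cs : List Char) :
    ∀ (t : List Char) (k : Nat) (acc : List Char) (prev : Char),
      1 ≤ k → cs.drop k = t → cs[k-1]? = some prev →
      (PySem.List.enumerate t (k : Int)).foldl (fun acc p =>
        if p.1 ≠ (cs.length : Int) - 1 ∧ p.1 ≠ 0 then
          if p.2 = '9' ∧ PySem.List.pyGetD cs (p.1 - 1) ' ' = '7' ∧ PySem.List.pyGetD cs (p.1 + 1) ' ' = '7'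
          then acc
          else acc ++ [p.2]
        else acc ++ [p.2]) acc = acc ++ pvMid prev t := by
  intro t
  induction t with
  | nil => intro k acc prev _ _ _; simp [PySem.List.enumerate_nil, pvMid]
  | cons c t' ih =>
    intro k acc prev hk hdrop hprev
    have hlen : cs.length = k + t'.length + 1 := pv_drop_len cs k c t' hdrop
    have hck : cs[k]? = some c := pv_drop_head cs k c t' hdrop
    have hdrop1 : cs.drop (k + 1) = t' := pv_drop_tail cs k c t' hdrop
    rw [PySem.List.enumerate_cons, List.foldl_cons]
    have hgprev : PySem.List.pyGetD cs ((k : Int) - 1) ' ' = prev := by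
      rw [show (k : Int) - 1 = ((k - 1 : Nat) : Int) by omega, PySem.List.pyGetD_natCast]
      simp [List.getD_eq_getElem?_getD, hprev]
    have hstep : (((k : Int)) + 1) = (((k + 1 : Nat) : Int)) := by omega
    cases t' with
    | nil =>
      -- k is the last index: the guard fails, ele is appended
      have hlen1 : cs.length = k + 1 := by simpa using hlen
      have hguard : ¬ ((k : Int) ≠ (cs.length : Int) - 1 ∧ (k : Int) ≠ 0) := by
        intro h; exact h.1 (by rw [hlen1]; push_cast; omega)
      rw [if_neg hguard]
      simp [PySem.List.enumerate_nil, pvMid]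
    | cons b u =>
      have hlen2 : cs.length = k + u.length + 2 := by
        have := pv_drop_len cs (k+1) b u hdrop1; omega
      have hguard : ((k : Int) ≠ (cs.length : Int) - 1 ∧ (k : Int) ≠ 0) := by
        constructor
        · rw [hlen2]; push_cast; omega
        · omega
      have hbk : cs[k+1]? = some b := pv_drop_head cs (k+1) b u hdrop1
      have hgb : PySem.List.pyGetD cs ((k : Int) + 1) ' ' = b := by
        rw [hstep, PySem.List.pyGetD_natCast]
        simp [List.getD_eq_getElem?_getD, hbk]
      rw [if_pos hguard]
      by_cases hskip : c = '9' ∧ prev = '7' ∧ b = '7'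
      · rw [if_pos (by rw [hgprev, hgb]; exact ⟨hskip.1, hskip.2.1, hskip.2.2⟩)]
        rw [hstep, ih (k+1) acc c (by omega) hdrop1 (by simpa using hck)]
        have hmid : pvMid prev (c :: b :: u) = pvMid c (b :: u) := by
          simp only [pvMid, List.head?_cons]
          rw [if_pos ⟨hskip.2.1, hskip.1, by rw [hskip.2.2]⟩]
        rw [hmid]
      · rw [if_neg (by rw [hgprev, hgb]; intro h; exact hskip ⟨h.1, h.2.1, h.2.2⟩)]
        rw [hstep, ih (k+1) (acc ++ [c]) c (by omega) hdrop1 (by simpa using hck)]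
        have hmid : pvMid prev (c :: b :: u) = c :: pvMid c (b :: u) := by
          simp only [pvMid, List.head?_cons]
          rw [if_neg (by simp only [List.head?_cons, Option.some.injEq]; intro h; exact hskip ⟨h.2.1, h.1, h.2.2⟩)]
        rw [hmid]; simp

-- ===== VERDICT (by name: the statement is the Claim_ definition above) =====
theorem seven_ate9_spec : Claim_equal_seven_ate9 := by
  unfold Claim_equal_seven_ate9
  intro str_ _
  simp only [Spec_seven_ate9, seven_ate9, seven_ate9_alt]
  cases hcs : str_.toList with
  | nil => simp [PySem.List.enumerate_nil, sevenAlt_loop]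
  | cons c t =>
    rw [PySem.List.enumerate_cons, List.foldl_cons]
    rw [if_neg (by simp)]
    have hA := sevenA_loop_eq (c :: t) t 1 [c] c (by omega) (by simp) (by simp)
    rw [show ((0:Int) + 1) = ((1 : Nat) : Int) by omega]
    rw [show ([] ++ [((0 : Int), c).2] : List Char) = [c] from rfl, hA]
    have hB := sevenAlt_loop_eq (c :: t) (c :: t).length (c :: t) (le_refl _) 0 [] (by simp)
    rw [hB]
    simp [pvGM]
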